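-- pv_equiv track=rewrite | github.com/tokarczyk03/Algorithms_and_Data_Structures | Lab11/Pattern_search.py | naiwna_v2
-- ===== SOURCE A (Python) =====
-- def naiwna_v2(S, W):
--     m = 0
--     i = 0
--     calls = 0
--     count = 0
--     while m < len(S) - len(W) + 1:
--             if S[m + i] == W[i]:
--                 calls += 1
--                 if i == len(W) - 1:
--                     count += 1
--                     m += 1
--                     i = 0
--                 else:
--                     i += 1
--             else:
--                 calls += 1
--                 m += 1
--                 i = 0
--     return count, calls
-- ===== SOURCE B (Python) =====
-- def _prefix_match_len(s, w):
--     p = 0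
--     while p < len(s) and p < len(w) and s[p] == w[p]:
--         p += 1
--     return p
--
--
-- def naiwna_v2(S, W):
--     k = len(W)
--     lcps = [_prefix_match_len(S[m:m + k], W) for m in range(len(S) - k + 1)]
--     count = sum(1 for p in lcps if p == k)
--     calls = sum(min(p + 1, k) for p in lcps)
--     return count, calls
-- ===== Notes on version B (the rewrite author's own statement) =====
-- stated objective: alternative
-- what changed: Instead of A's one-comparison-at-a-time counting state machine, B computes for each window the longest matching prefix length p and then derives both outputs arithmetically: count = #{p = len(W)}, calls = sum of min(p+1, len(W)).
import Mathlib
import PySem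

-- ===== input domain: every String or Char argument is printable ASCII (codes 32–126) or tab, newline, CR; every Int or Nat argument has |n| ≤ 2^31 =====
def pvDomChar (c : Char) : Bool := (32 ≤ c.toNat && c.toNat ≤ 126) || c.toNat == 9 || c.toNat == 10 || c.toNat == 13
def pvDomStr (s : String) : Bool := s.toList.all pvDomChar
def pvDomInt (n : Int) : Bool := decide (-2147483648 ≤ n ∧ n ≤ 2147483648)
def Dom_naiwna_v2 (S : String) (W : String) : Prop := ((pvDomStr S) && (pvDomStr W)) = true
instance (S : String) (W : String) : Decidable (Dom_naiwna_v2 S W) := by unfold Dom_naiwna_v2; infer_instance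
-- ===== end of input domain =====

-- B replaces A's per-comparison counting state machine by a staged computation: the longest
-- matching prefix length of each window, from which count and calls are derived arithmetically.

-- ===== PORT A =====
-- A's while-loop over the mutable state (m, i, calls, count).  All Python indexes here are
-- nonnegative, so S[m+i] / W[i] are in-range list indexes guarded by the explicit
-- index-in-range test `hin` (its failure is Python's IndexError, where the loop bails out;
-- those inputs are outside Pre_).
def naiwna_v2Loop (s w : List Char) (m i calls count : Nat) : Int × Int :=
  if (m : Int) < (s.length : Int) - (w.length : Int) + 1 then
    if hin : m + i < s.length ∧ i < w.length then
      if s[m + i] == w[i] then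
        if i = w.length - 1 then
          naiwna_v2Loop s w (m + 1) 0 (calls + 1) (count + 1)
        else
          naiwna_v2Loop s w m (i + 1) (calls + 1) count
      else
        naiwna_v2Loop s w (m + 1) 0 (calls + 1) count
    else ((count : Int), (calls : Int))   -- IndexError in Python
  else
    ((count : Int), (calls : Int))
termination_by (s.length + 1 - (w.length + m), w.length - i)
decreasing_by
  · left; omega
  · right; omega
  · left; omega

def naiwna_v2 (S : String) (W : String) : Int × Int :=
  naiwna_v2Loop S.toList W.toList 0 0 0 0

-- ===== PORT B =====
-- Source B's `_prefix_match_len` while-loop, index p over both lists.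
def prefixMatchLen (s w : List Char) (p : Nat) : Nat :=
  if h : p < s.length ∧ p < w.length then
    if s[p] == w[p] then prefixMatchLen s w (p + 1) else p
  else p
termination_by s.length - p

-- Source B's naiwna_v2: the list comprehension over range(len(S)-len(W)+1) (Python's empty range
-- for a nonpositive stop is Nat truncation here), with the slice S[m:m+k] as drop/take
-- (exact: both bounds are nonnegative), then the two arithmetic aggregations.
def naiwna_v2_alt (S : String) (W : String) : Int × Int :=
  let s := S.toList
  let w := W.toList
  let k := w.length
  let lcps := (List.range (s.length + 1 - k)).map (fun m => prefixMatchLen ((s.drop m).take k) w 0)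
  (((lcps.countP (fun p => p = k) : Nat) : Int),
   (((lcps.map (fun p => min (p + 1) k)).sum : Nat) : Int))

-- ===== PRECONDITION & SPEC =====
-- Pre_ excludes only the empty pattern W, on which A raises IndexError (via W[0]).
def Pre_naiwna_v2 (S : String) (W : String) : Prop := W ≠ ""
instance (S : String) (W : String) : Decidable (Pre_naiwna_v2 S W) := by
  unfold Pre_naiwna_v2; infer_instance

def pvWitness_naiwna_v2 : String × String := ("abab", "ab")

def Spec_naiwna_v2 (S : String) (W : String) (out : Int × Int) : Prop := out = naiwna_v2_alt S W
instance (S : String) (W : String) (out : Int × Int) : Decidable (Spec_naiwna_v2 S W out) := by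
  unfold Spec_naiwna_v2; infer_instance

-- ===== CLAIM (what is proved, stated in full; the proofs are below) =====
def Claim_equal_naiwna_v2 : Prop := ∀ (S : String) (W : String), Dom_naiwna_v2 S W → Pre_naiwna_v2 S W → Spec_naiwna_v2 S W (naiwna_v2 S W)

-- ===== LEMMAS AND PROOFS =====

-- prefixMatchLen never returns less than its start index.
theorem pml_ge (s w : List Char) : ∀ fuel p, s.length - p ≤ fuel → p ≤ prefixMatchLen s w p := by
  intro fuel
  induction fuel with
  | zero =>
    intro p hf
    rw [prefixMatchLen]
    split
    · omega
    · exact le_refl p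
  | succ fuel ih =>
    intro p hf
    rw [prefixMatchLen]
    split
    · split
      · exact le_trans (by omega) (ih (p + 1) (by omega))
      · exact le_refl p
    · exact le_refl p

-- prefixMatchLen is bounded by the pattern length.
theorem pml_le (s w : List Char) : ∀ fuel p, s.length - p ≤ fuel → p ≤ w.length →
    prefixMatchLen s w p ≤ w.length := by
  intro fuel
  induction fuel with
  | zero =>
    intro p hf hp
    rw [prefixMatchLen]
    split
    · omega
    · exact hp
  | succ fuel ih =>
    intro p hf hp
    rw [prefixMatchLen]
    split
    next h =>
      split
      · exact ih (p + 1) (by omega) (by omega)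
      · exact hp
    · exact hp

-- Truncating s to the pattern length does not change prefixMatchLen (the loop condition
-- p < len(w) caps the scan anyway).
theorem pml_take (s w : List Char) : ∀ fuel p, s.length - p ≤ fuel →
    prefixMatchLen (s.take w.length) w p = prefixMatchLen s w p := by
  intro fuel
  induction fuel with
  | zero =>
    intro p hf
    have hL : prefixMatchLen (s.take w.length) w p = p := by
      rw [prefixMatchLen, dif_neg (by simp only [List.length_take]; omega)]
    have hR : prefixMatchLen s w p = p := by
      rw [prefixMatchLen, dif_neg (by omega)]
    rw [hL, hR]
  | succ fuel ih =>
    intro p hf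
    by_cases h : p < s.length ∧ p < w.length
    · have hL : prefixMatchLen (s.take w.length) w p =
          if (s.take w.length)[p]'(by simp only [List.length_take]; omega) == w[p]'h.2 then
            prefixMatchLen (s.take w.length) w (p + 1) else p := by
        rw [prefixMatchLen, dif_pos (by simp only [List.length_take]; omega)]
      have hR : prefixMatchLen s w p =
          if s[p]'h.1 == w[p]'h.2 then prefixMatchLen s w (p + 1) else p := by
        rw [prefixMatchLen, dif_pos h]
      rw [hL, hR, List.getElem_take]
      split
      · exact ih (p + 1) (by omega)
      · rfl
    · have hL : prefixMatchLen (s.take w.length) w p = p := by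
        rw [prefixMatchLen, dif_neg (by simp only [List.length_take]; omega)]
      have hR : prefixMatchLen s w p = p := by
        rw [prefixMatchLen, dif_neg h]
      rw [hL, hR]

-- A's scan of the window starting at m, from column i: it performs exactly
-- min(P - i + 1, k - i) comparisons and matches iff P = k, where P is Source B's
-- prefix-match length of the window continued from index i.
theorem scan_eq (s w : List Char) (m : Nat) (hb : m + w.length ≤ s.length) :
    ∀ fuel i calls count, w.length - i ≤ fuel → i < w.length →
      naiwna_v2Loop s w m i calls count =
        naiwna_v2Loop s w (m + 1) 0
          (calls + (min (prefixMatchLen (s.drop m) w i + 1) w.length - i))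
          (count + if prefixMatchLen (s.drop m) w i = w.length then 1 else 0) := by
  intro fuel
  induction fuel with
  | zero => intro i calls count hf hi; omega
  | succ fuel ih =>
    intro i calls count hf hi
    have hsi : m + i < s.length := by omega
    have hdl : (s.drop m).length = s.length - m := by simp
    have hdg : (s.drop m)[i]'(by omega) = s[m + i]'hsi := by
      rw [List.getElem_drop]
    have hP : prefixMatchLen (s.drop m) w i =
        if (s.drop m)[i]'(by omega) == w[i]'hi then prefixMatchLen (s.drop m) w (i + 1) else i := by
      rw [prefixMatchLen]
      rw [dif_pos (by omega : i < (s.drop m).length ∧ i < w.length)]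
    have hguard : (m : Int) < (s.length : Int) - (w.length : Int) + 1 := by omega
    rw [naiwna_v2Loop, if_pos hguard, dif_pos ⟨hsi, hi⟩]
    by_cases hc : s[m + i] == w[i]
    · rw [if_pos hc]
      have hc' : ((s.drop m)[i]'(by omega) == w[i]'hi) = true := by rw [hdg]; exact hc
      rw [hc', if_pos rfl] at hP
      by_cases hl : i = w.length - 1
      · rw [if_pos hl]
        have hend : prefixMatchLen (s.drop m) w (i + 1) = i + 1 := by
          rw [prefixMatchLen, dif_neg (by omega)]
        have hPk : prefixMatchLen (s.drop m) w i = w.length := by rw [hP, hend]; omega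
        rw [hPk]
        have h1 : min (w.length + 1) w.length - i = 1 := by omega
        rw [h1, if_pos rfl]
      · rw [if_neg hl]
        rw [ih (i + 1) (calls + 1) count (by omega) (by omega)]
        have hge : i + 1 ≤ prefixMatchLen (s.drop m) w (i + 1) :=
          pml_ge (s.drop m) w (s.drop m).length (i + 1) (by omega)
        have hle : prefixMatchLen (s.drop m) w (i + 1) ≤ w.length :=
          pml_le (s.drop m) w (s.drop m).length (i + 1) (by omega) (by omega)
        rw [hP]
        congr 1
        omega
    · rw [if_neg hc]
      have hc' : ((s.drop m)[i]'(by omega) == w[i]'hi) = false := by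
        rw [hdg]; exact Bool.eq_false_iff.mpr (by simpa using hc)
      rw [hc', if_neg (by simp)] at hP
      rw [hP]
      have h1 : min (i + 1) w.length - i = 1 := by omega
      rw [h1, if_neg (by omega)]
      norm_num

-- The whole of A's loop from window m equals B's aggregation over the remaining windows.
theorem loop_eq (s w : List Char) (hk : 1 ≤ w.length) :
    ∀ fuel m calls count, s.length + 1 - w.length - m ≤ fuel →
      naiwna_v2Loop s w m 0 calls count =
        (((count + ((List.range' m (s.length + 1 - w.length - m)).map
              (fun j => prefixMatchLen (s.drop j) w 0)).countP (fun p => p = w.length) : Nat) : Int),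
         ((calls + (((List.range' m (s.length + 1 - w.length - m)).map
              (fun j => prefixMatchLen (s.drop j) w 0)).map (fun p => min (p + 1) w.length)).sum : Nat) : Int)) := by
  intro fuel
  induction fuel with
  | zero =>
    intro m calls count hf
    have hz : s.length + 1 - w.length - m = 0 := by omega
    rw [hz]
    rw [naiwna_v2Loop, if_neg (by omega)]
    simp
  | succ fuel ih =>
    intro m calls count hf
    by_cases hg : m < s.length + 1 - w.length
    · have hb : m + w.length ≤ s.length := by omega
      rw [scan_eq s w m hb w.length 0 calls count (by omega) (by omega)]
      rw [ih (m + 1) _ _ (by omega)]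
      have hrange : s.length + 1 - w.length - m = (s.length + 1 - w.length - (m + 1)) + 1 := by omega
      rw [hrange, List.range'_succ]
      have hge : 0 ≤ prefixMatchLen (s.drop m) w 0 := Nat.zero_le _
      have hle : prefixMatchLen (s.drop m) w 0 ≤ w.length :=
        pml_le (s.drop m) w (s.drop m).length 0 (by omega) (by omega)
      simp only [List.map_cons, List.countP_cons, List.sum_cons, Prod.mk.injEq]
      refine ⟨?_, ?_⟩
      · congr 1
        split_ifs with h1 h2 h2 <;> simp_all <;> omega
      · congr 1
        omega
    · have hz : s.length + 1 - w.length - m = 0 := by omega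
      rw [hz]
      rw [naiwna_v2Loop, if_neg (by omega)]
      simp

-- ===== VERDICT (by name: the statement is the Claim_ definition above) =====
theorem naiwna_v2_spec : Claim_equal_naiwna_v2 := by
  intro S W _ hpre
  unfold Spec_naiwna_v2 naiwna_v2 naiwna_v2_alt
  have h0 : W.toList ≠ [] := by
    intro h
    exact hpre (by simpa using congrArg String.ofList h)
  have hk : 1 ≤ W.toList.length := List.length_pos_of_ne_nil h0
  rw [loop_eq S.toList W.toList hk (S.toList.length + 1 - W.toList.length) 0 0 0 (by omega)]
  simp only [Nat.sub_zero, ← List.range_eq_range']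
  have hmap : ∀ j, prefixMatchLen ((S.toList.drop j).take W.toList.length) W.toList 0 =
      prefixMatchLen (S.toList.drop j) W.toList 0 := fun j =>
    pml_take (S.toList.drop j) W.toList (S.toList.drop j).length 0 (by omega)
  simp only [hmap]
  simp
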